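-- pv_equiv track=rewrite | github.com/Hitansh-2006/ML- | ML task.py | Hermione_Spell
-- ===== SOURCE A (Python) =====
-- def Hermione_Spell(runes: str) :
--     required = set("LUMOS")
--     collected_letters = set()
--
--     for i in range(len(runes)):
--         ch = runes[i]
--         step = i + 1
--
--         upper_ch = ch.upper()
--         if upper_ch in required:
--             collected_letters.add(upper_ch)
--
--         if collected_letters == required:
--             return step
--
--
--     return -1
-- ===== SOURCE B (Python) =====
-- def Hermione_Spell(runes: str):
--     best = -1
--     for letter in "LUMOS":
--         idx = next((i for i, ch in enumerate(runes) if ch.upper() == letter), None)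
--         if idx is None:
--             return -1
--         best = max(best, idx)
--     return best + 1
-- ===== Notes on version B (the rewrite author's own statement) =====
-- stated objective: alternative
-- what changed: Replaces A's single pass that accumulates a set of collected letters and tests set equality at each step with a per-letter first-occurrence search over the fixed word LUMOS followed by a max reduction (+1), returning -1 if any letter never occurs.
import Mathlib
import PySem

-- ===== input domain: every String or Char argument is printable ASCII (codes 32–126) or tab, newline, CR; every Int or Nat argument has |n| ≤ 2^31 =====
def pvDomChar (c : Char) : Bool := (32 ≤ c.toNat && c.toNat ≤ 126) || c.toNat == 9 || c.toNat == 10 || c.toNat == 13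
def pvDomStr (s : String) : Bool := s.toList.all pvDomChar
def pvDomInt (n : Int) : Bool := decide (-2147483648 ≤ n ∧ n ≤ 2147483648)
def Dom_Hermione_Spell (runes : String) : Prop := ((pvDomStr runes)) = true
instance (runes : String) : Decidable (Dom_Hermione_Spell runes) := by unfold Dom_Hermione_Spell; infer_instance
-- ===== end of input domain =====

-- B replaces A's single accumulating-set pass with a per-letter first-occurrence search over
-- "LUMOS" followed by a max reduction (+1); objective: alternative (same asymptotic cost).

-- ===== PORT A =====
-- required = set("LUMOS")
def pvReq : PySem.Set Char := PySem.Set.ofList "LUMOS".toList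

-- the for-loop over range(len(runes)) with the running index i and collected_letters
def pvLoopA : List Char → Int → PySem.Set Char → Int
  | [], _, _ => -1
  | c :: cs, i, col =>
    let u := PySem.Chars.upperChar c      -- ch.upper(); exact for one ASCII char (Dom)
    let col' := if PySem.Set.contains pvReq u then PySem.Set.add col u else col
    if PySem.Set.equal col' pvReq then i + 1 else pvLoopA cs (i + 1) col'

def Hermione_Spell (runes : String) : Int :=
  pvLoopA runes.toList 0 PySem.Set.empty

-- ===== PORT B =====
-- next((i for i, ch in enumerate(runes) if ch.upper() == letter), None)
def pvFirst (cs : List Char) (l : Char) : Option Nat :=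
  List.findIdx? (fun c => PySem.Chars.upperChar c == l) cs

-- the for-loop over "LUMOS" with the running best index
def pvLoopB (cs : List Char) : List Char → Int → Int
  | [], best => best + 1
  | l :: ls, best =>
    match pvFirst cs l with
    | none => -1
    | some k => pvLoopB cs ls (max best (k : Int))

def Hermione_Spell_alt (runes : String) : Int :=
  pvLoopB runes.toList "LUMOS".toList (-1)

-- ===== PRECONDITION & SPEC =====
def Spec_Hermione_Spell (runes : String) (out : Int) : Prop := out = Hermione_Spell_alt runes
instance (runes : String) (out : Int) : Decidable (Spec_Hermione_Spell runes out) := by unfold Spec_Hermione_Spell; infer_instance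

-- ===== CLAIM (what is proved, stated in full; the proofs are below) =====
def Claim_equal_Hermione_Spell : Prop := ∀ (runes : String), Dom_Hermione_Spell runes → Spec_Hermione_Spell runes (Hermione_Spell runes)

-- ===== LEMMAS AND PROOFS =====

-- the required letters A has not collected yet, in the fixed order of "LUMOS"
def pvMissing (col : PySem.Set Char) : List Char :=
  "LUMOS".toList.filter (fun l => !PySem.Set.contains col l)

-- max of the first-occurrence indices of the letters ls in cs (none if one is absent);
-- the common reference value both loops compute
def pvAllMax (cs : List Char) : List Char → Option Nat
  | [] => some 0
  | l :: ls =>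
    match pvFirst cs l, pvAllMax cs ls with
    | some k, some m => some (max k m)
    | _, _ => none

theorem pvReq_eq : pvReq = "LUMOS".toList := by decide

theorem pv_contains_add (col : PySem.Set Char) (u l : Char) :
    PySem.Set.contains (PySem.Set.add col u) l = (PySem.Set.contains col l || l == u) := by
  simp only [PySem.Set.add]
  by_cases hcu : PySem.Set.contains col u = true
  · rw [if_pos hcu]
    by_cases hl : l = u
    · subst hl; rw [hcu]; simp
    · simp [beq_eq_false_iff_ne.mpr hl]
  · rw [if_neg hcu]
    by_cases hl : l = u
    · subst hl
      simp [PySem.Set.contains]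
    · have hlu : (l == u) = false := beq_eq_false_iff_ne.mpr hl
      simp [PySem.Set.contains, hlu, hl]

theorem pv_mem_iff (s : PySem.Set Char) (x : Char) :
    PySem.Set.contains s x = true ↔ x ∈ s := by
  simp [PySem.Set.contains]

theorem pvAllMax_nil (ls : List Char) (h : ls ≠ []) : pvAllMax [] ls = none := by
  cases ls with
  | nil => exact absurd rfl h
  | cons l ls => simp [pvAllMax, pvFirst]

theorem pvAllMax_cons (c : Char) (cs : List Char) (ls : List Char) :
    pvAllMax (c :: cs) ls =
      (pvAllMax cs (ls.filter (fun l => !(l == PySem.Chars.upperChar c)))).map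
        (fun m => if ls.filter (fun l => !(l == PySem.Chars.upperChar c)) = [] then 0 else m + 1) := by
  induction ls with
  | nil => simp [pvAllMax]
  | cons l ls ih =>
    by_cases hl : l = PySem.Chars.upperChar c
    · have hF : pvFirst (c :: cs) l = some 0 := by
        simp [pvFirst, List.findIdx?_cons, hl]
      have hfil : (l :: ls).filter (fun l => !(l == PySem.Chars.upperChar c))
          = ls.filter (fun l => !(l == PySem.Chars.upperChar c)) := by
        simp [List.filter, hl]
      rw [hfil]
      cases hM : pvAllMax cs (ls.filter (fun l => !(l == PySem.Chars.upperChar c))) with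
      | none => simp [pvAllMax, hF, ih, hM]
      | some m => simp [pvAllMax, hF, ih, hM]
    · have hbeq : (PySem.Chars.upperChar c == l) = false :=
        beq_eq_false_iff_ne.mpr (fun h => hl h.symm)
      have hF : pvFirst (c :: cs) l = (pvFirst cs l).map (fun i => i + 1) := by
        simp [pvFirst, List.findIdx?_cons, hbeq]
      have hfil : (l :: ls).filter (fun l => !(l == PySem.Chars.upperChar c))
          = l :: ls.filter (fun l => !(l == PySem.Chars.upperChar c)) := by
        simp [List.filter, beq_eq_false_iff_ne.mpr hl]
      rw [hfil]
      cases hFl : pvFirst cs l with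
      | none => simp [pvAllMax, hF, hFl, ih]
      | some k =>
        cases hM : pvAllMax cs (ls.filter (fun l => !(l == PySem.Chars.upperChar c))) with
        | none => simp [pvAllMax, hF, hFl, ih, hM]
        | some m =>
          by_cases hls : ls.filter (fun l => !(l == PySem.Chars.upperChar c)) = []
          · rw [hls] at hM
            have hm0 : m = 0 := by
              have h' := hM
              simp [pvAllMax] at h'
              omega
            subst hm0
            rw [hls] at ih
            simp [pvAllMax, hF, hFl, ih, hM, hls]
          · simp [pvAllMax, hF, hFl, ih, hM, hls]

theorem pvLoopB_eq (ls cs : List Char) (best : Int) :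
    pvLoopB cs ls best =
      match pvAllMax cs ls with
      | none => -1
      | some m => (if ls = [] then best else max best (m : Int)) + 1 := by
  induction ls generalizing best with
  | nil => simp [pvLoopB, pvAllMax]
  | cons l ls ih =>
    cases hF : pvFirst cs l with
    | none => simp [pvLoopB, pvAllMax, hF]
    | some k =>
      rw [show pvLoopB cs (l :: ls) best = pvLoopB cs ls (max best (k : Int)) by
        simp [pvLoopB, hF]]
      rw [ih]
      cases hM : pvAllMax cs ls with
      | none => simp [pvAllMax, hF, hM]
      | some m =>
        by_cases hls : ls = []
        · subst hls
          have hm0 : m = 0 := by simpa [pvAllMax] using hM.symm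
          subst hm0
          simp [pvAllMax, hF]
        · simp [pvAllMax, hF, hM, hls, Nat.cast_max]

theorem pvMissing_step (col : PySem.Set Char) (c : Char) :
    pvMissing (if PySem.Set.contains pvReq (PySem.Chars.upperChar c) then PySem.Set.add col (PySem.Chars.upperChar c) else col)
      = (pvMissing col).filter (fun l => !(l == PySem.Chars.upperChar c)) := by
  set u := PySem.Chars.upperChar c with hu
  unfold pvMissing
  rw [List.filter_filter]
  apply List.filter_congr
  intro l hl
  by_cases hb : PySem.Set.contains pvReq u = true
  · rw [if_pos hb, pv_contains_add]
    cases hcl : PySem.Set.contains col l <;> cases hlu : (l == u) <;> simp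
  · rw [if_neg hb]
    have hlu : (l == u) = false := by
      apply beq_eq_false_iff_ne.mpr
      intro h
      subst h
      exact hb ((pv_mem_iff _ _).mpr (by rw [pvReq_eq]; exact hl))
    simp [hlu]

theorem pv_equal_iff (col' : PySem.Set Char) (hsub : ∀ x ∈ col', x ∈ "LUMOS".toList) :
    PySem.Set.equal col' pvReq = true ↔ pvMissing col' = [] := by
  have h1 : PySem.Set.issubset col' pvReq = true := by
    simp only [PySem.Set.issubset, List.all_eq_true]
    intro x hx
    rw [pv_mem_iff, pvReq_eq]
    exact hsub x hx
  constructor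
  · intro h
    simp only [PySem.Set.equal, Bool.and_eq_true] at h
    have h2 := h.2
    simp only [PySem.Set.issubset, List.all_eq_true] at h2
    unfold pvMissing
    rw [List.filter_eq_nil_iff]
    intro l hl
    have hx := h2 l (by rw [pvReq_eq]; exact hl)
    simp
    exact (pv_mem_iff col' l).mp hx
  · intro h
    unfold pvMissing at h
    rw [List.filter_eq_nil_iff] at h
    simp only [PySem.Set.equal, Bool.and_eq_true]
    refine ⟨h1, ?_⟩
    simp only [PySem.Set.issubset, List.all_eq_true]
    intro x hx
    have := h x (by rw [pvReq_eq] at hx; exact hx)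
    simpa using this

theorem pvLoopA_eq (cs : List Char) : ∀ (i : Int) (col : PySem.Set Char),
    (∀ x ∈ col, x ∈ "LUMOS".toList) → pvMissing col ≠ [] →
    pvLoopA cs i col =
      match pvAllMax cs (pvMissing col) with
      | none => -1
      | some m => i + m + 1 := by
  induction cs with
  | nil =>
    intro i col _ hne
    rw [pvAllMax_nil _ hne]
    simp [pvLoopA]
  | cons c cs ih =>
    intro i col hsub hne
    set u := PySem.Chars.upperChar c with hu
    set col' := if PySem.Set.contains pvReq u then PySem.Set.add col u else col with hcol'
    have hsub' : ∀ x ∈ col', x ∈ "LUMOS".toList := by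
      intro x hx
      by_cases hb : PySem.Set.contains pvReq u = true
      · rw [hcol', if_pos hb] at hx
        by_cases hxc : x ∈ col
        · exact hsub x hxc
        · have hxu : x = u := by
            simp only [PySem.Set.add] at hx
            by_cases hcu : PySem.Set.contains col u = true
            · rw [if_pos hcu] at hx; exact absurd hx hxc
            · rw [if_neg hcu] at hx
              rcases List.mem_append.mp hx with h | h
              · exact absurd h hxc
              · simpa using h
          rw [hxu, ← pvReq_eq]
          exact (pv_mem_iff _ _).mp hb
      · rw [hcol', if_neg hb] at hx
        exact hsub x hx
    have hmiss : pvMissing col' = (pvMissing col).filter (fun l => !(l == u)) :=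
      pvMissing_step col c
    have hstep : pvLoopA (c :: cs) i col =
        if PySem.Set.equal col' pvReq then i + 1 else pvLoopA cs (i + 1) col' := rfl
    rw [hstep, pvAllMax_cons, ← hu, ← hmiss]
    by_cases hEq : PySem.Set.equal col' pvReq = true
    · rw [if_pos hEq]
      have h0 : pvMissing col' = [] := (pv_equal_iff col' hsub').mp hEq
      rw [h0]
      simp [pvAllMax]
    · rw [if_neg hEq]
      have hne' : pvMissing col' ≠ [] := by
        intro h
        exact hEq ((pv_equal_iff col' hsub').mpr h)
      rw [ih (i + 1) col' hsub' hne']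
      cases hM : pvAllMax cs (pvMissing col') with
      | none => simp
      | some m =>
        simp [hne']
        ring

-- ===== VERDICT (by name: the statement is the Claim_ definition above) =====
theorem Hermione_Spell_spec : Claim_equal_Hermione_Spell := by
  intro runes _
  unfold Spec_Hermione_Spell Hermione_Spell Hermione_Spell_alt
  have hmiss : pvMissing PySem.Set.empty = "LUMOS".toList := by decide
  have hA := pvLoopA_eq runes.toList 0 PySem.Set.empty
    (by intro x hx; simp [PySem.Set.empty] at hx) (by rw [hmiss]; decide)
  rw [hmiss] at hA
  rw [hA, pvLoopB_eq]
  cases hM : pvAllMax runes.toList "LUMOS".toList with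
  | none => simp
  | some m =>
    simp
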